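-- pv_equiv track=rewrite | github.com/Kawser-nerd/CLCDSA | Source Codes/AtCoder/agc016/C/1364983.py | solve
-- ===== SOURCE A (Python) =====
-- def solve(H, W, h, w):
--     if H % h == 0 and W % w == 0:
--         return False, None
--     else:
--         matrix = [[10 ** 3] * W for __ in range(H)]
--         val = - (h * w * 1000) + 999
--         for _h in range(h - 1, H, h):
--             for _w in range(w - 1, W, w):
--                 matrix[_h][_w] = val
--
--     return True, matrix
-- ===== SOURCE B (Python) =====
-- def solve(H, W, h, w):
--     if H % h == 0 and W % w == 0:
--         return False, None
--     qh, rh = divmod(H, h)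
--     if qh <= 0:
--         return True, [[1000] * W] * H
--     val = -(h * w * 1000) + 999
--     qw, rw = divmod(W, w)
--     if qw <= 0:
--         special_row = [1000] * W
--     else:
--         special_row = ([1000] * (w - 1) + [val]) * qw + [1000] * rw
--     return True, ([[1000] * W] * (h - 1) + [special_row]) * qh + [[1000] * W] * rh
-- ===== Notes on version B (the rewrite author's own statement) =====
-- stated objective: simpler
-- what changed: A allocates an all-1000 H-by-W matrix and then mutates the strided special cells with nested Python loops; B never iterates over cells or indices at all: divmod gives the number of full h-by-w blocks, and the matrix is assembled by list repetition (qw special blocks plus a plain remainder make the special row, qh row blocks plus plain remainder rows make the matrix), exploiting the periodicity of the answer.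
-- outside the precondition, e.g. on solve(-6, -6, -6, -5): A returns (True, []), B returns (True, [[-29001]])
import Mathlib
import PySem

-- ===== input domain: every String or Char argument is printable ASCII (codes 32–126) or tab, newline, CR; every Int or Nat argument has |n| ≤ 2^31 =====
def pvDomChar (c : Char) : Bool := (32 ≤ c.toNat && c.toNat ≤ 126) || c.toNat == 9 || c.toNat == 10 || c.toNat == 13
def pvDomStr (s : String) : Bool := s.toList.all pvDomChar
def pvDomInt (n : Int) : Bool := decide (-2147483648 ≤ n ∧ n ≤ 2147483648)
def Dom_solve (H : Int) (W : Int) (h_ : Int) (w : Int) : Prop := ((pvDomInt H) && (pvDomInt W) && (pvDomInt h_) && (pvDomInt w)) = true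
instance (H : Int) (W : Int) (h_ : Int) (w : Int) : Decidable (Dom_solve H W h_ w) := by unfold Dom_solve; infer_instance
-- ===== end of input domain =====

-- B replaces A's two-phase build (allocate an all-1000 matrix, then overwrite the strided special
-- cells with nested loops) by exploiting the h×w periodicity of the answer: divmod gives the block
-- counts and the matrix is assembled by list repetition, with no per-cell pass (objective: simpler).

-- ===== PORT A =====
def solve (H : Int) (W : Int) (h_ : Int) (w : Int) : Bool × Option (List (List Int)) :=
  if PySem.Int.mod H h_ = 0 ∧ PySem.Int.mod W w = 0 then (false, none)
  else
    -- matrix = [[10 ** 3] * W for __ in range(H)]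
    let matrix : List (List Int) := (PySem.List.pyRange 0 H 1).map (fun _ => List.replicate W.toNat (1000 : Int))
    let val : Int := -(h_ * w * 1000) + 999
    -- for _h in range(h - 1, H, h): for _w in range(w - 1, W, w): matrix[_h][_w] = val
    -- (pySetD/pyGetD model the in-place 'matrix[_h][_w] = val'; indices are nonnegative and in
    --  range on Pre_solve, which excludes the h ≤ 0 / w ≤ 0 inputs where Python's loop raises
    --  or wraps negative indices)
    let m := (PySem.List.pyRange (h_ - 1) H h_).foldl (fun acc r =>
        (PySem.List.pyRange (w - 1) W w).foldl (fun acc2 c =>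
          PySem.List.pySetD acc2 r (PySem.List.pySetD (PySem.List.pyGetD acc2 r []) c val)) acc) matrix
    (true, some m)

-- ===== PORT B =====
-- Python 'lst * n' is ported by hand as List.flatten (List.replicate n.toNat lst) (exact: n ≤ 0
-- gives []); '[x] * n' as List.replicate n.toNat x; divmod as PySem.Int.floordiv / mod.
def solve_alt (H : Int) (W : Int) (h_ : Int) (w : Int) : Bool × Option (List (List Int)) :=
  if PySem.Int.mod H h_ = 0 ∧ PySem.Int.mod W w = 0 then (false, none)
  -- qh, rh = divmod(H, h); if qh <= 0: return True, [[1000] * W] * H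
  else if PySem.Int.floordiv H h_ ≤ 0 then
    (true, some (List.replicate H.toNat (List.replicate W.toNat (1000 : Int))))
  else
    -- special_row = [1000]*W if qw <= 0 else ([1000]*(w-1) + [val]) * qw + [1000]*rw
    -- return True, ([[1000]*W]*(h-1) + [special_row]) * qh + [[1000]*W]*rh
    (true, some (List.flatten (List.replicate (PySem.Int.floordiv H h_).toNat
        (List.replicate (h_ - 1).toNat (List.replicate W.toNat (1000 : Int)) ++
          [if PySem.Int.floordiv W w ≤ 0 then List.replicate W.toNat (1000 : Int)
           else List.flatten (List.replicate (PySem.Int.floordiv W w).toNat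
               (List.replicate (w - 1).toNat (1000 : Int) ++ [-(h_ * w * 1000) + 999])) ++
             List.replicate (PySem.Int.mod W w).toNat (1000 : Int)]))
      ++ List.replicate (PySem.Int.mod H h_).toNat (List.replicate W.toNat (1000 : Int))))

-- ===== PRECONDITION & SPEC =====
-- Pre_ restricts to the contest task's natural domain 1 ≤ h and 1 ≤ w (block sizes are positive
-- counts); outside it A raises ZeroDivisionError (h = 0, or w = 0 reached by the guard), ValueError
-- (a step-0 range that is actually built) or IndexError (negative-step indices past the matrix),
-- or — where its negative-step ranges happen to be empty — returns an untouched all-1000 matrix,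
-- an accident of range() on negative counts that no reading of the task covers (B agrees with A on
-- most of those accidental returns anyway, e.g. all of w = 0; see the cited examples).
def Pre_solve (H : Int) (W : Int) (h_ : Int) (w : Int) : Prop := 1 ≤ h_ ∧ 1 ≤ w
instance (H : Int) (W : Int) (h_ : Int) (w : Int) : Decidable (Pre_solve H W h_ w) := by unfold Pre_solve; infer_instance
def pvWitness_solve : Int × Int × Int × Int := (3, 3, 2, 2)

def Spec_solve (H : Int) (W : Int) (h_ : Int) (w : Int) (out : Bool × Option (List (List Int))) : Prop := out = solve_alt H W h_ w
instance (H : Int) (W : Int) (h_ : Int) (w : Int) (out : Bool × Option (List (List Int))) : Decidable (Spec_solve H W h_ w out) := by unfold Spec_solve; infer_instance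

-- ===== CLAIM (what is proved, stated in full; the proofs are below) =====
def Claim_equal_solve : Prop := ∀ (H : Int) (W : Int) (h_ : Int) (w : Int), Dom_solve H W h_ w → Pre_solve H W h_ w → Spec_solve H W h_ w (solve H W h_ w)

-- ===== LEMMAS AND PROOFS =====

-- Entries of A's inner column fold (one row written at the indices of C).
theorem pv_wr_getElem? (val : Int) : ∀ (C : List Int) (row : List Int),
    (∀ c ∈ C, 0 ≤ c ∧ c < (row.length : Int)) → ∀ j : Nat,
    (C.foldl (fun r c => PySem.List.pySetD r c val) row)[j]? = if (j : Int) ∈ C then some val else row[j]? := by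
  intro C
  induction C with
  | nil => intro row _ j; simp
  | cons c cs ih =>
    intro row hC j
    obtain ⟨hc0, hcl⟩ := hC c (List.mem_cons_self ..)
    rw [List.foldl_cons, PySem.List.pySetD_of_nonneg row val hc0]
    have hC' : ∀ x ∈ cs, 0 ≤ x ∧ x < ((row.set c.toNat val).length : Int) := by
      intro x hx; rw [List.length_set]; exact hC x (List.mem_cons_of_mem _ hx)
    rw [ih _ hC' j]
    by_cases hj : (j : Int) ∈ cs
    · simp [hj, List.mem_cons]
    · simp only [hj, if_false]
      by_cases hje : (j : Int) = c
      · have hcj : c.toNat = j := by omega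
        have hlt : j < row.length := by omega
        rw [hcj, List.getElem?_set_self hlt]
        simp [List.mem_cons, hje]
      · have hne : c.toNat ≠ j := by omega
        rw [List.getElem?_set_ne hne]
        simp [List.mem_cons, hje, hj]

-- A's inner loop writes row r of the matrix to the row-fold result.
theorem pv_inner_eq (val : Int) : ∀ (C : List Int) (m : List (List Int)) (i : Int), 0 ≤ i → i < (m.length : Int) →
    C.foldl (fun acc2 c => PySem.List.pySetD acc2 i (PySem.List.pySetD (PySem.List.pyGetD acc2 i []) c val)) m
      = m.set i.toNat (C.foldl (fun r c => PySem.List.pySetD r c val) (m.getD i.toNat [])) := by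
  intro C
  induction C with
  | nil =>
    intro m i hi0 hil
    have h : i.toNat < m.length := by omega
    rw [List.foldl_nil, List.foldl_nil, List.getD_eq_getElem _ _ h, List.set_getElem_self]
  | cons c cs ih =>
    intro m i hi0 hil
    have h : i.toNat < m.length := by omega
    have hget : PySem.List.pyGetD m i [] = m.getD i.toNat [] := by
      conv_lhs => rw [show i = ((i.toNat : Nat) : Int) by omega]
      rw [PySem.List.pyGetD_natCast]
    rw [List.foldl_cons, hget, PySem.List.pySetD_of_nonneg _ _ hi0]
    have hlen : (m.set i.toNat (PySem.List.pySetD (m.getD i.toNat []) c val)).length = m.length := List.length_set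
    rw [ih _ i hi0 (by rw [hlen]; exact hil)]
    have hgd : (m.set i.toNat (PySem.List.pySetD (m.getD i.toNat []) c val)).getD i.toNat []
        = PySem.List.pySetD (m.getD i.toNat []) c val := by
      rw [List.getD_eq_getElem _ _ (by rw [hlen]; exact h)]
      exact List.getElem_set_self _
    rw [hgd, List.set_set, List.foldl_cons]

-- Entries of A's outer fold: row k is column-folded iff k ∈ R, other rows untouched.
theorem pv_outer_getElem? (val : Int) (C : List Int) : ∀ (R : List Int), R.Nodup → ∀ (m : List (List Int)),
    (∀ r ∈ R, 0 ≤ r ∧ r < (m.length : Int)) → ∀ k : Nat,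
    (R.foldl (fun acc r => C.foldl (fun acc2 c => PySem.List.pySetD acc2 r (PySem.List.pySetD (PySem.List.pyGetD acc2 r []) c val)) acc) m)[k]?
      = if (k : Int) ∈ R then (m[k]?).map (fun row => C.foldl (fun r c => PySem.List.pySetD r c val) row) else m[k]? := by
  intro R
  induction R with
  | nil => intro _ m _ k; simp
  | cons r rs ih =>
    intro hnd m hR k
    obtain ⟨hr0, hrl⟩ := hR r (List.mem_cons_self ..)
    have hnr : r ∉ rs := (List.nodup_cons.mp hnd).1
    have hnd' : rs.Nodup := (List.nodup_cons.mp hnd).2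
    rw [List.foldl_cons, pv_inner_eq val C m r hr0 hrl]
    have hlen1 : (m.set r.toNat (C.foldl (fun a c => PySem.List.pySetD a c val) (m.getD r.toNat []))).length = m.length :=
      List.length_set
    have hR' : ∀ x ∈ rs, 0 ≤ x ∧ x < ((m.set r.toNat (C.foldl (fun a c => PySem.List.pySetD a c val) (m.getD r.toNat []))).length : Int) := by
      intro x hx; rw [hlen1]; exact hR x (List.mem_cons_of_mem _ hx)
    rw [ih hnd' _ hR' k]
    by_cases hk : (k : Int) ∈ rs
    · have hke : (k : Int) ≠ r := by
        intro h; rw [h] at hk; exact hnr hk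
      have hkne : r.toNat ≠ k := by omega
      rw [List.getElem?_set_ne hkne]
      simp [hk, List.mem_cons]
    · simp only [hk, if_false]
      by_cases hke : (k : Int) = r
      · have hkr : r.toNat = k := by omega
        have hklen : k < m.length := by omega
        rw [← hkr, List.getElem?_set_self (by omega)]
        rw [hkr, List.getElem?_eq_getElem hklen]
        rw [List.getD_eq_getElem _ _ (by omega)]
        simp [List.mem_cons, hke]
      · have hkne : r.toNat ≠ k := by omega
        rw [List.getElem?_set_ne hkne]
        simp [List.mem_cons, hke, hk]

-- General step pyRange has no duplicates.
theorem pv_nodup_pyRange (a b s : Int) (hs : s ≠ 0) : (PySem.List.pyRange a b s).Nodup := by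
  have hinj : Function.Injective (fun k : Nat => a + s * (k : Int)) := by
    intro k1 k2 hk
    have h1 : s * (k1 : Int) = s * (k2 : Int) := by
      have := hk
      simp only at this
      omega
    have h2 := mul_left_cancel₀ hs h1
    exact_mod_cast h2
  rcases lt_or_gt_of_ne hs with hneg | hpos
  · rw [PySem.List.pyRange_of_neg a b hneg]
    exact List.Nodup.map hinj List.nodup_range
  · rw [PySem.List.pyRange_of_pos a b hpos]
    exact List.Nodup.map hinj List.nodup_range

-- A's whole else branch equals the membership-map form.
theorem pv_main (val HH WW : Int) (R C : List Int) (hnd : R.Nodup)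
    (hRb : ∀ r ∈ R, 0 ≤ r ∧ r < HH) (hCb : ∀ c ∈ C, 0 ≤ c ∧ c < WW) :
    R.foldl (fun acc r => C.foldl (fun acc2 c => PySem.List.pySetD acc2 r (PySem.List.pySetD (PySem.List.pyGetD acc2 r []) c val)) acc)
      ((PySem.List.pyRange 0 HH 1).map (fun _ => List.replicate WW.toNat (1000 : Int)))
    = (PySem.List.pyRange 0 HH 1).map (fun i => (PySem.List.pyRange 0 WW 1).map (fun j => if i ∈ R ∧ j ∈ C then val else (1000 : Int))) := by
  have hWlen : (PySem.List.pyRange 0 WW 1).length = WW.toNat := by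
    rw [PySem.List.length_pyRange_one]; simp
  apply List.ext_getElem?
  intro k
  have hinitlen : (((PySem.List.pyRange 0 HH 1).map (fun _ => List.replicate WW.toNat (1000 : Int))).length : Int) = (HH.toNat : Int) := by
    rw [List.length_map, PySem.List.length_pyRange_one]; simp
  have hRb' : ∀ r ∈ R, 0 ≤ r ∧ r < ((((PySem.List.pyRange 0 HH 1).map (fun _ => List.replicate WW.toNat (1000 : Int))).length : Nat) : Int) := by
    intro r hr
    obtain ⟨h1, h2⟩ := hRb r hr
    refine ⟨h1, ?_⟩
    rw [hinitlen]; omega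
  rw [pv_outer_getElem? val C R hnd _ hRb' k]
  rw [List.getElem?_map, List.getElem?_map, PySem.List.getElem?_pyRange_one]
  by_cases hk : k < (HH - 0).toNat
  · rw [if_pos hk]
    simp only [Option.map_some, zero_add]
    by_cases hkR : (k : Int) ∈ R
    · rw [if_pos hkR]
      congr 1
      apply List.ext_getElem?
      intro j
      have hCb' : ∀ c ∈ C, 0 ≤ c ∧ c < ((List.replicate WW.toNat (1000 : Int)).length : Int) := by
        intro c hc
        obtain ⟨h1, h2⟩ := hCb c hc
        refine ⟨h1, ?_⟩
        rw [List.length_replicate]; omega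
      rw [pv_wr_getElem? val C _ hCb' j]
      rw [List.getElem?_map, PySem.List.getElem?_pyRange_one]
      by_cases hj : j < (WW - 0).toNat
      · rw [if_pos hj]
        simp only [Option.map_some, zero_add]
        by_cases hjC : (j : Int) ∈ C
        · rw [if_pos hjC, if_pos ⟨hkR, hjC⟩]
        · rw [if_neg hjC, if_neg (by tauto)]
          rw [List.getElem?_replicate]
          rw [if_pos (by omega)]
      · rw [if_neg hj]
        have hjC : (j : Int) ∉ C := by
          intro hc
          obtain ⟨h1, h2⟩ := hCb _ hc
          omega
        rw [if_neg hjC, List.getElem?_replicate, if_neg (by omega)]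
        simp
    · rw [if_neg hkR]
      congr 1
      rw [show (List.map (fun j => if (k : Int) ∈ R ∧ j ∈ C then val else (1000 : Int)) (PySem.List.pyRange 0 WW 1))
            = List.map (fun _ => (1000 : Int)) (PySem.List.pyRange 0 WW 1) from
          List.map_congr_left (fun a _ => by rw [if_neg (by tauto)])]
      rw [List.map_const', hWlen]
  · rw [if_neg hk]
    have hkR : (k : Int) ∉ R := by
      intro hr
      obtain ⟨h1, h2⟩ := hRb _ hr
      omega
    rw [if_neg hkR]
    simp

-- (i+1) % P = 0 ↔ i % P = P - 1 (Nat, 0 < P).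
theorem pv_succ_mod (P i : Nat) (hP : 0 < P) : (i + 1) % P = 0 ↔ i % P = P - 1 := by
  rw [Nat.add_mod]
  have hm := Nat.mod_lt i hP
  by_cases h1 : P = 1
  · subst h1; simp
  · rw [Nat.mod_eq_of_lt (show 1 < P by omega)]
    by_cases hs : i % P + 1 < P
    · rw [Nat.mod_eq_of_lt hs]
      omega
    · have he : i % P + 1 = P := by omega
      rw [he, Nat.mod_self]
      omega

-- Membership in A's strided range pyRange (p-1) N p, for 0 ≤ i < N, is a mod condition.
theorem pv_mem_stride (p N : Int) (hp : 1 ≤ p) (i : Nat) (hi : (i : Int) < N) :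
    ((i : Int) ∈ PySem.List.pyRange (p - 1) N p) ↔ i % p.toNat = p.toNat - 1 := by
  rw [PySem.List.mem_pyRange_iff_of_pos (by omega)]
  have hrw : (i : Int) - (p - 1) = ((i : Int) + 1) - p := by ring
  rw [hrw]
  have hcast : ((i : Int) + 1) = ((i + 1 : Nat) : Int) := by push_cast; ring
  have hpcast : p = ((p.toNat : Nat) : Int) := by omega
  constructor
  · rintro ⟨hle, _, hdvd⟩
    rw [Int.dvd_iff_emod_eq_zero, Int.sub_emod_right, hcast, hpcast] at hdvd
    have hz : (i + 1) % p.toNat = 0 := by exact_mod_cast hdvd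
    exact (pv_succ_mod p.toNat i (by omega)).mp hz
  · intro hmod
    have hz : (i + 1) % p.toNat = 0 := (pv_succ_mod p.toNat i (by omega)).mpr hmod
    refine ⟨?_, hi, ?_⟩
    · have := Nat.mod_le i p.toNat
      omega
    · rw [Int.dvd_iff_emod_eq_zero, Int.sub_emod_right, hcast, hpcast]
      exact_mod_cast hz
-- Entry i (i < n*p) of a p-periodic tiling is entry i % p of the block.
theorem pv_flat_rep_getElem? {α : Type} (blk : List α) (p : Nat) (hlen : blk.length = p) :
    ∀ (n i : Nat), i < n * p → (List.flatten (List.replicate n blk))[i]? = blk[i % p]? := by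
  intro n
  induction n with
  | zero => intro i hi; omega
  | succ m ih =>
    intro i hi
    have hmul : (m + 1) * p = m * p + p := Nat.succ_mul m p
    rw [List.replicate_succ, List.flatten_cons]
    by_cases hil : i < p
    · rw [List.getElem?_append_left (by omega), Nat.mod_eq_of_lt hil]
    · rw [List.getElem?_append_right (by omega), hlen]
      rw [ih (i - p) (by omega)]
      rw [show i % p = (i - p) % p from Nat.mod_eq_sub_mod (by omega)]

-- B's counted tiling (qh full blocks ending in x, then the plain remainder) equals a map over range N.
theorem pv_tile {α : Type} (N p : Int) (hp : 1 ≤ p) (hq : 1 ≤ PySem.Int.floordiv N p) (d x : α) (f : Int → α)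
    (hf : ∀ i : Nat, (i : Int) < N → (List.replicate (p - 1).toNat d ++ [x])[i % p.toNat]? = some (f i)) :
    List.flatten (List.replicate (PySem.Int.floordiv N p).toNat (List.replicate (p - 1).toNat d ++ [x]))
        ++ List.replicate (PySem.Int.mod N p).toNat d
      = (PySem.List.pyRange 0 N 1).map f := by
  have hqr : PySem.Int.floordiv N p * p + PySem.Int.mod N p = N := PySem.Int.floordiv_mul_add_mod N p
  have hr0 : 0 ≤ PySem.Int.mod N p := PySem.Int.mod_nonneg N (by omega)
  have hrp : PySem.Int.mod N p < p := PySem.Int.mod_lt N (by omega)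
  have hblk : (List.replicate (p - 1).toNat d ++ [x]).length = p.toNat := by
    simp only [List.length_append, List.length_replicate, List.length_cons, List.length_nil]
    omega
  have hpq : (1 : Int) * p ≤ PySem.Int.floordiv N p * p :=
    mul_le_mul_of_nonneg_right hq (by omega)
  have hcast : (((PySem.Int.floordiv N p).toNat * p.toNat : Nat) : Int) = PySem.Int.floordiv N p * p := by
    push_cast
    rw [Int.toNat_of_nonneg (by omega), Int.toNat_of_nonneg (by omega)]
  have hflatlen : (List.flatten (List.replicate (PySem.Int.floordiv N p).toNat (List.replicate (p - 1).toNat d ++ [x]))).length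
      = (PySem.Int.floordiv N p).toNat * p.toNat := by
    rw [show (List.replicate (PySem.Int.floordiv N p).toNat (List.replicate (p - 1).toNat d ++ [x])).flatten.length
          = (PySem.Int.floordiv N p).toNat * (List.replicate (p - 1).toNat d ++ [x]).length from by simp, hblk]
  apply List.ext_getElem?
  intro k
  rw [List.getElem?_map, PySem.List.getElem?_pyRange_one]
  by_cases h1 : k < (PySem.Int.floordiv N p).toNat * p.toNat
  · rw [List.getElem?_append_left (by rw [hflatlen]; exact h1)]
    rw [pv_flat_rep_getElem? _ p.toNat hblk _ k h1]
    rw [hf k (by omega), if_pos (by omega)]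
    norm_num
  · rw [List.getElem?_append_right (by rw [hflatlen]; omega), hflatlen]
    by_cases h2 : k < N.toNat
    · rw [List.getElem?_replicate, if_pos (by omega), if_pos (by omega)]
      have ht : k - (PySem.Int.floordiv N p).toNat * p.toNat < p.toNat := by omega
      have hmod : k % p.toNat = k - (PySem.Int.floordiv N p).toNat * p.toNat := by
        conv_lhs => rw [show k = p.toNat * (PySem.Int.floordiv N p).toNat + (k - (PySem.Int.floordiv N p).toNat * p.toNat) from by rw [Nat.mul_comm]; omega]
        rw [Nat.mul_add_mod, Nat.mod_eq_of_lt ht]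
      have hfk := hf k (by omega)
      rw [hmod, List.getElem?_append_left (by simp; omega), List.getElem?_replicate, if_pos (by omega)] at hfk
      simp only [Option.map_some, zero_add]
      exact hfk
    · rw [List.getElem?_replicate, if_neg (by omega), if_neg (by omega)]
      rfl

-- ===== VERDICT (by name: the statement is the Claim_ definition above) =====

theorem solve_spec : Claim_equal_solve := by
  intro H W h_ w _ hPre
  obtain ⟨hh, hw⟩ := hPre
  unfold Spec_solve solve solve_alt
  by_cases hg : PySem.Int.mod H h_ = 0 ∧ PySem.Int.mod W w = 0
  · simp [hg]
  · simp only [if_neg hg]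
    have hRb : ∀ r ∈ PySem.List.pyRange (h_ - 1) H h_, 0 ≤ r ∧ r < H := by
      intro r hr
      rw [PySem.List.mem_pyRange_iff_of_pos (by omega)] at hr
      omega
    have hCb : ∀ c ∈ PySem.List.pyRange (w - 1) W w, 0 ≤ c ∧ c < W := by
      intro c hc
      rw [PySem.List.mem_pyRange_iff_of_pos (by omega)] at hc
      omega
    have hWlen : (PySem.List.pyRange 0 W 1).length = W.toNat := by
      rw [PySem.List.length_pyRange_one]; simp
    have hplainW : ∀ i : Int, (i : Int) ∉ PySem.List.pyRange (h_ - 1) H h_ →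
        (PySem.List.pyRange 0 W 1).map (fun j => if i ∈ PySem.List.pyRange (h_ - 1) H h_ ∧ j ∈ PySem.List.pyRange (w - 1) W w then -(h_ * w * 1000) + 999 else (1000 : Int))
          = List.replicate W.toNat (1000 : Int) := by
      intro i hiR
      rw [show (List.map (fun j => if i ∈ PySem.List.pyRange (h_ - 1) H h_ ∧ j ∈ PySem.List.pyRange (w - 1) W w then -(h_ * w * 1000) + 999 else (1000 : Int)) (PySem.List.pyRange 0 W 1))
            = List.map (fun _ => (1000 : Int)) (PySem.List.pyRange 0 W 1) from
          List.map_congr_left (fun a _ => by rw [if_neg (by tauto)])]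
      rw [List.map_const', hWlen]
    by_cases hqh : PySem.Int.floordiv H h_ ≤ 0
    · -- no full row block fits: H < h, so A's strided row range is empty and all rows are plain
      rw [if_pos hqh]
      refine congrArg (fun x => (true, some x)) ?_
      rw [pv_main (-(h_ * w * 1000) + 999) H W _ _ (pv_nodup_pyRange _ _ _ (by omega)) hRb hCb]
      have hHh : H < h_ := by
        have := (PySem.Int.floordiv_lt_iff_lt_mul (show (0:Int) < h_ by omega)).mp (show PySem.Int.floordiv H h_ < 1 by omega)
        omega
      rw [show (List.map (fun i => List.map (fun j => if i ∈ PySem.List.pyRange (h_ - 1) H h_ ∧ j ∈ PySem.List.pyRange (w - 1) W w then -(h_ * w * 1000) + 999 else (1000 : Int)) (PySem.List.pyRange 0 W 1)) (PySem.List.pyRange 0 H 1))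
            = List.map (fun _ => List.replicate W.toNat (1000 : Int)) (PySem.List.pyRange 0 H 1) from
          List.map_congr_left (fun a ha => by
            refine hplainW a (fun hmem => ?_)
            rw [PySem.List.mem_pyRange_iff_of_pos (by omega)] at hmem
            omega)]
      rw [List.map_const', PySem.List.length_pyRange_one]
      norm_num
    · rw [if_neg hqh]
      refine congrArg (fun x => (true, some x)) ?_
      rw [pv_main (-(h_ * w * 1000) + 999) H W _ _ (pv_nodup_pyRange _ _ _ (by omega)) hRb hCb]
      refine Eq.symm (pv_tile H h_ hh (by omega) _ _ _ ?_)
      intro i hi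
      by_cases his : i % h_.toNat < (h_ - 1).toNat
      · rw [List.getElem?_append_left (by rw [List.length_replicate]; omega)]
        rw [List.getElem?_replicate, if_pos (by omega)]
        have hnotR : ¬ ((i : Int) ∈ PySem.List.pyRange (h_ - 1) H h_) := by
          rw [pv_mem_stride h_ H hh i hi]; omega
        rw [hplainW i hnotR]
      · have hilt : i % h_.toNat < h_.toNat := Nat.mod_lt _ (by omega)
        rw [List.getElem?_append_right (by rw [List.length_replicate]; omega)]
        rw [List.length_replicate]
        have hz : i % h_.toNat - (h_ - 1).toNat = 0 := by omega
        rw [hz]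
        have hinR : (i : Int) ∈ PySem.List.pyRange (h_ - 1) H h_ := by
          rw [pv_mem_stride h_ H hh i hi]; omega
        simp only [List.getElem?_cons_zero, Option.some.injEq]
        have hrowmap : (PySem.List.pyRange 0 W 1).map (fun j => if (i : Int) ∈ PySem.List.pyRange (h_ - 1) H h_ ∧ j ∈ PySem.List.pyRange (w - 1) W w then -(h_ * w * 1000) + 999 else (1000 : Int))
            = (PySem.List.pyRange 0 W 1).map (fun j => if j ∈ PySem.List.pyRange (w - 1) W w then -(h_ * w * 1000) + 999 else (1000 : Int)) :=
          List.map_congr_left (fun a _ => by simp [hinR])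
      -- the special row itself, by the same tiling argument one dimension down
        by_cases hqw : PySem.Int.floordiv W w ≤ 0
        · rw [if_pos hqw]
          have hWw : W < w := by
            have := (PySem.Int.floordiv_lt_iff_lt_mul (show (0:Int) < w by omega)).mp (show PySem.Int.floordiv W w < 1 by omega)
            omega
          rw [show (List.map (fun j => if j ∈ PySem.List.pyRange (w - 1) W w then -(h_ * w * 1000) + 999 else (1000 : Int)) (PySem.List.pyRange 0 W 1))
                = List.map (fun _ => (1000 : Int)) (PySem.List.pyRange 0 W 1) from
              List.map_congr_left (fun a _ => by
                refine if_neg (fun hmem => ?_)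
                rw [PySem.List.mem_pyRange_iff_of_pos (by omega)] at hmem
                omega)] at hrowmap
          rw [hrowmap, List.map_const', hWlen]
        · rw [if_neg hqw, hrowmap]
          refine pv_tile W w hw (by omega) _ _ _ ?_
          intro j hj
          by_cases hjs : j % w.toNat < (w - 1).toNat
          · rw [List.getElem?_append_left (by rw [List.length_replicate]; omega)]
            rw [List.getElem?_replicate, if_pos (by omega)]
            rw [if_neg (by rw [pv_mem_stride w W hw j hj]; omega)]
          · have hjlt : j % w.toNat < w.toNat := Nat.mod_lt _ (by omega)
            rw [List.getElem?_append_right (by rw [List.length_replicate]; omega)]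
            rw [List.length_replicate]
            have hzj : j % w.toNat - (w - 1).toNat = 0 := by omega
            rw [hzj]
            rw [if_pos (by rw [pv_mem_stride w W hw j hj]; omega)]
            rfl
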